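-- pv_equiv track=rewrite | github.com/i-redbyte/leetcode | easy/find target indices after sorting array/solution.py | entry_start
-- ===== SOURCE A (Python) =====
-- from typing import List
--
-- def entry_start(nums: List[int], target: int, is_first: bool) -> int:
--     result = -1
--     nums = sorted(nums)
--     left = 0
--     right = len(nums) - 1
--     while left <= right:
--         mid = left + (right - left) // 2
--         if nums[mid] == target:
--             result = mid
--             if is_first:
--                 right = mid - 1
--             else:
--                 left = mid + 1
--         elif target < nums[mid]:
--             right = mid - 1
--         else:
--             left = mid + 1
--     return result
-- ===== SOURCE B (Python) =====
-- def entry_start(nums, target, is_first):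
--     lt = 0
--     eq = 0
--     for x in nums:
--         if x < target:
--             lt += 1
--         elif x == target:
--             eq += 1
--     if eq == 0:
--         return -1
--     return lt if is_first else lt + eq - 1
-- ===== Notes on version B (the rewrite author's own statement) =====
-- stated objective: alternative
-- what changed: Replaces sort-then-binary-search with a single counting pass: the first sorted index of target is the number of elements below it, the last is that plus its multiplicity minus one.
import Mathlib
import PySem

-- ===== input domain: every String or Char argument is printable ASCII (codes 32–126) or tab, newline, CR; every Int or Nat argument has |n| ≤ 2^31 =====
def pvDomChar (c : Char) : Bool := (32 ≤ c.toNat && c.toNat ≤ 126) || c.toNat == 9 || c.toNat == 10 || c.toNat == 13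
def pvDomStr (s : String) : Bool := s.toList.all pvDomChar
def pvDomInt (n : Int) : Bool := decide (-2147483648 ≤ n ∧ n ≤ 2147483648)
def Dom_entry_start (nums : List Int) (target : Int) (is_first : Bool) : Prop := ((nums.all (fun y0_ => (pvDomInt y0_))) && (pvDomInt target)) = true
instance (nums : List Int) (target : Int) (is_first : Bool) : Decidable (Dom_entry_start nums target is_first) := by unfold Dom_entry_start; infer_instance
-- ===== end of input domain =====

-- B replaces A's sort + binary search with a single counting pass (first index = #elements below target); proved to return the same value on all inputs.


-- ===== PORT A =====
-- A's while loop: state (left, right, result); `none` from pyGet? (Python's IndexError)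
-- cannot occur on the loop's reachable states, the fallback only makes the function total.
def bsLoop (s : List Int) (t : Int) (isf : Bool) : Nat → Int → Int → Int → Int
  | 0, _, _, result => result
  | fuel + 1, left, right, result =>
    if left ≤ right then
      match PySem.List.pyGet? s (left + PySem.Int.floordiv (right - left) 2) with
      | none => result
      | some v =>
        if v = t then
          if isf then
            bsLoop s t isf fuel left (left + PySem.Int.floordiv (right - left) 2 - 1)
              (left + PySem.Int.floordiv (right - left) 2)
          else
            bsLoop s t isf fuel (left + PySem.Int.floordiv (right - left) 2 + 1) right
              (left + PySem.Int.floordiv (right - left) 2)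
        else if t < v then
          bsLoop s t isf fuel left (left + PySem.Int.floordiv (right - left) 2 - 1) result
        else
          bsLoop s t isf fuel (left + PySem.Int.floordiv (right - left) 2 + 1) right result
    else result

def entry_start (nums : List Int) (target : Int) (is_first : Bool) : Int :=
  bsLoop (PySem.List.sorted nums (fun x => x) false) target is_first
    ((PySem.List.sorted nums (fun x => x) false).length + 1)
    0 ((PySem.List.sorted nums (fun x => x) false).length - 1) (-1)

-- ===== PORT B =====
def entry_start_alt (nums : List Int) (target : Int) (is_first : Bool) : Int :=
  let p := nums.foldl
    (fun (acc : Int × Int) x =>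
      if x < target then (acc.1 + 1, acc.2)
      else if x = target then (acc.1, acc.2 + 1)
      else acc) (0, 0)
  if p.2 = 0 then -1
  else if is_first then p.1 else p.1 + p.2 - 1

-- ===== PRECONDITION & SPEC =====
def Spec_entry_start (nums : List Int) (target : Int) (is_first : Bool) (out : Int) : Prop := out = entry_start_alt nums target is_first
instance (nums : List Int) (target : Int) (is_first : Bool) (out : Int) : Decidable (Spec_entry_start nums target is_first out) := by unfold Spec_entry_start; infer_instance

-- ===== CLAIM (what is proved, stated in full; the proofs are below) =====
def Claim_equal_entry_start : Prop := ∀ (nums : List Int) (target : Int) (is_first : Bool), Dom_entry_start nums target is_first → Spec_entry_start nums target is_first (entry_start nums target is_first)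

-- ===== LEMMAS AND PROOFS =====

-- B's fold computes (count of elements < t, count of elements = t).
lemma altFold (t : Int) (l : List Int) : ∀ (a b : Int),
    l.foldl (fun (acc : Int × Int) x =>
      if x < t then (acc.1 + 1, acc.2)
      else if x = t then (acc.1, acc.2 + 1)
      else acc) (a, b)
    = (a + (l.countP (fun x => decide (x < t)) : Int), b + (l.count t : Int)) := by
  induction l with
  | nil => simp
  | cons x xs ih =>
    intro a b
    simp only [List.foldl_cons, List.countP_cons, List.count_cons]
    rcases lt_trichotomy x t with hx | hx | hx
    · rw [if_pos hx, ih]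
      have : ¬ (x == t) := by simp; omega
      simp [hx, this]
      omega
    · rw [if_neg (by omega), if_pos hx, ih]
      simp [hx]
      omega
    · rw [if_neg (by omega), if_neg (by omega), ih]
      have : ¬ (x == t) := by simp; omega
      simp [this, not_lt_of_gt hx]

-- In a (≤-monotone-indexed) list, a downward-closed predicate holds exactly on the first countP indices.
lemma countP_sorted_iff (t : Int) (p : Int → Bool)
    (hp : ∀ a b : Int, a ≤ b → p b → p a) :
    ∀ (s : List Int),
      s.Pairwise (fun a b => a ≤ b) →
      ∀ i (hi : i < s.length), (p (s[i]'hi) ↔ i < s.countP p) := by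
  intro s
  induction s with
  | nil => intro _ i hi; simp at hi
  | cons a tl ih =>
    intro hs i hi
    have hle : ∀ x ∈ tl, a ≤ x := (List.pairwise_cons.mp hs).1
    have htl := (List.pairwise_cons.mp hs).2
    by_cases hpa : p a
    · cases i with
      | zero => simpa [List.countP_cons, hpa]
      | succ j =>
        have hj : j < tl.length := by simpa using hi
        have := ih htl j hj
        simp only [List.countP_cons, hpa]
        simpa [List.getElem_cons_succ] using by
          constructor
          · intro h; have := this.mp h; omega
          · intro h; exact this.mpr (by omega)
    · have hz : tl.countP p = 0 := by
        rw [List.countP_eq_zero]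
        intro x hx hpx
        exact hpa (hp a x (hle x hx) hpx)
      have hz' : (a :: tl).countP p = 0 := by
        simp [List.countP_cons, hpa, hz]
      rw [hz']
      cases i with
      | zero => simpa using hpa
      | succ j =>
        have hj : j < tl.length := by simpa using hi
        simp only [List.getElem_cons_succ]
        constructor
        · intro h
          exact absurd (hp a _ (hle _ (List.getElem_mem hj)) h) hpa
        · omega

lemma cnt_split (t : Int) (l : List Int) :
    l.countP (fun x => decide (x ≤ t)) = l.countP (fun x => decide (x < t)) + l.count t := by
  induction l with
  | nil => simp
  | cons x xs ih =>
    simp only [List.countP_cons, List.count_cons, ih]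
    rcases lt_trichotomy x t with hx | hx | hx
    · have : ¬ (x == t) := by simp; omega
      simp [hx, le_of_lt hx, this]
      omega
    · simp [hx]
      omega
    · have : ¬ (x == t) := by simp; omega
      simp [this, not_lt_of_gt hx, not_le_of_gt hx]

-- sortedness as index-monotonicity
lemma sorted_mono (s : List Int) (hs : s.Pairwise (fun a b => a ≤ b))
    {i j : Nat} (hi : i < s.length) (hj : j < s.length) (hij : i ≤ j) :
    s[i]'hi ≤ s[j]'hj := by
  rcases eq_or_lt_of_le hij with rfl | hlt
  · exact le_refl _
  · exact List.pairwise_iff_getElem.mp hs i j hi hj hlt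

-- at loop exit, left is exactly countP of a downward-closed boundary
lemma final_bound (s : List Int) (t : Int) (p : Int → Bool) (left : Int)
    (h0 : 0 ≤ left) (hn : left ≤ (s.length : Int))
    (h3 : ∀ i (hi : i < s.length), (i : Int) < left → p (s[i]'hi))
    (h4 : ∀ i (hi : i < s.length), left ≤ (i : Int) → ¬ p (s[i]'hi))
    (hiff : ∀ i (hi : i < s.length), (p (s[i]'hi) ↔ i < s.countP p)) :
    (s.countP p : Int) = left := by
  have hc : s.countP p ≤ s.length := List.countP_le_length
  by_contra hne
  rcases lt_or_gt_of_ne hne with hlt | hgt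
  · -- countP < left : index countP is < left, so p holds there, contradiction with hiff
    have hi : s.countP p < s.length := by omega
    have := h3 (s.countP p) hi (by omega)
    have := (hiff _ hi).mp this
    omega
  · -- left < countP : index left.toNat < countP, p holds by hiff, contradicting h4
    have hi : left.toNat < s.length := by omega
    have hp' : p (s[left.toNat]'hi) := (hiff _ hi).mpr (by omega)
    exact h4 left.toNat hi (by omega) hp'


-- loop exit (left = right + 1), first-index version
lemma finish_first (s : List Int) (t : Int)
    (hs : s.Pairwise (fun a b => a ≤ b)) (left right result : Int)
    (heq : left = right + 1) (h0 : 0 ≤ left) (h1 : right ≤ (s.length : Int) - 1)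
    (h3 : ∀ i (hi : i < s.length), (i : Int) < left → s[i]'hi < t)
    (h4 : ∀ i (hi : i < s.length), right < (i : Int) → t ≤ s[i]'hi)
    (h5 : result = -1 → ∀ i (hi : i < s.length), s[i]'hi = t → left ≤ (i : Int) ∧ (i : Int) ≤ right)
    (h6 : result ≠ -1 → ∃ (i : Nat) (hi : i < s.length), result = (i : Int) ∧ s[i]'hi = t ∧ left ≤ (i : Int) ∧ (i : Int) ≤ right + 1) :
    result = (if s.count t = 0 then -1 else (s.countP (fun x => decide (x < t)) : Int)) := by
  have hiff := countP_sorted_iff t (fun x => decide (x < t))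
    (fun a b hab hb => by simp only [decide_eq_true_eq] at *; omega) s hs
  by_cases hres : result = -1
  · have h5' := h5 hres
    have hz : s.count t = 0 := by
      rw [List.count_eq_zero]
      intro hmem
      obtain ⟨i, hi, hieq⟩ := List.mem_iff_getElem.mp hmem
      have := h5' i hi hieq
      omega
    simp [hz, hres]
  · obtain ⟨i, hi, hr, hit, hli, hir⟩ := h6 hres
    have hz : s.count t ≠ 0 := by
      rw [Ne, List.count_eq_zero]
      intro hnm; exact hnm (hit ▸ List.getElem_mem hi)
    rw [if_neg hz]
    have hcl : (s.countP (fun x => decide (x < t)) : Int) = left := by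
      refine final_bound s t _ left h0 (by omega) ?_ ?_ hiff
      · intro j hj hjl; simpa using h3 j hj hjl
      · intro j hj hlj hpj
        simp only [decide_eq_true_eq] at hpj
        have := h4 j hj (by omega)
        omega
    omega

-- loop exit (left = right + 1), last-index version
lemma finish_last (s : List Int) (t : Int)
    (hs : s.Pairwise (fun a b => a ≤ b)) (left right result : Int)
    (heq : left = right + 1) (h0 : 0 ≤ left) (h1 : right ≤ (s.length : Int) - 1)
    (h3 : ∀ i (hi : i < s.length), (i : Int) < left → s[i]'hi ≤ t)
    (h4 : ∀ i (hi : i < s.length), right < (i : Int) → t < s[i]'hi)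
    (h5 : result = -1 → ∀ i (hi : i < s.length), s[i]'hi = t → left ≤ (i : Int) ∧ (i : Int) ≤ right)
    (h6 : result ≠ -1 → ∃ (i : Nat) (hi : i < s.length), result = (i : Int) ∧ s[i]'hi = t ∧ left - 1 ≤ (i : Int) ∧ (i : Int) ≤ right) :
    result = (if s.count t = 0 then -1 else (s.countP (fun x => decide (x ≤ t)) : Int) - 1) := by
  have hiff := countP_sorted_iff t (fun x => decide (x ≤ t))
    (fun a b hab hb => by simp only [decide_eq_true_eq] at *; omega) s hs
  by_cases hres : result = -1
  · have h5' := h5 hres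
    have hz : s.count t = 0 := by
      rw [List.count_eq_zero]
      intro hmem
      obtain ⟨i, hi, hieq⟩ := List.mem_iff_getElem.mp hmem
      have := h5' i hi hieq
      omega
    simp [hz, hres]
  · obtain ⟨i, hi, hr, hit, hli, hir⟩ := h6 hres
    have hz : s.count t ≠ 0 := by
      rw [Ne, List.count_eq_zero]
      intro hnm; exact hnm (hit ▸ List.getElem_mem hi)
    rw [if_neg hz]
    have hcl : (s.countP (fun x => decide (x ≤ t)) : Int) = left := by
      refine final_bound s t _ left h0 (by omega) ?_ ?_ hiff
      · intro j hj hjl; simpa using h3 j hj hjl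
      · intro j hj hlj hpj
        simp only [decide_eq_true_eq] at hpj
        have := h4 j hj (by omega)
        omega
    omega

lemma loop_first (s : List Int) (t : Int)
    (hs : s.Pairwise (fun a b => a ≤ b)) :
    ∀ (fuel : Nat) (left right result : Int),
      (right + 1 - left).toNat ≤ fuel →
      0 ≤ left → right ≤ (s.length : Int) - 1 → left ≤ right + 1 →
      (∀ i (hi : i < s.length), (i : Int) < left → s[i]'hi < t) →
      (∀ i (hi : i < s.length), right < (i : Int) → t ≤ s[i]'hi) →
      (result = -1 → ∀ i (hi : i < s.length), s[i]'hi = t → left ≤ (i : Int) ∧ (i : Int) ≤ right) →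
      (result ≠ -1 → ∃ (i : Nat) (hi : i < s.length), result = (i : Int) ∧ s[i]'hi = t ∧ left ≤ (i : Int) ∧ (i : Int) ≤ right + 1) →
      bsLoop s t true fuel left right result
        = (if s.count t = 0 then -1 else (s.countP (fun x => decide (x < t)) : Int)) := by
  intro fuel
  induction fuel with
  | zero =>
    intro left right result hfuel h0 h1 h2 h3 h4 h5 h6
    exact finish_first s t hs left right result (by omega) h0 h1 h3 h4 h5 h6
  | succ f ih =>
    intro left right result hfuel h0 h1 h2 h3 h4 h5 h6
    by_cases hlr : left ≤ right
    · rw [bsLoop, if_pos hlr]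
      have hfd : PySem.Int.floordiv (right - left) 2 = (right - left) / 2 :=
        PySem.Int.floordiv_eq_ediv_of_pos (by norm_num)
      have hd0 : 0 ≤ (right - left) / 2 := Int.ediv_nonneg (by omega) (by norm_num)
      have hd1 : (right - left) / 2 ≤ right - left := Int.ediv_le_self _ (by omega)
      have hg0 : 0 ≤ left + (right - left) / 2 := by omega
      have hg1 : left + (right - left) / 2 < (s.length : Int) := by omega
      rw [hfd, PySem.List.pyGet?_eq_some_getElem s hg0 hg1]
      have hm : ((left + (right - left) / 2).toNat : Int) = left + (right - left) / 2 :=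
        Int.toNat_of_nonneg hg0
      set m : Nat := (left + (right - left) / 2).toNat with hmdef
      have hmn : m < s.length := by omega
      have c1L : (left + (right - left) / 2 - 1 + 1 - left).toNat ≤ f := by
        clear ih h3 h4 h5 h6; omega
      have c1R : (right + 1 - (left + (right - left) / 2 + 1)).toNat ≤ f := by
        clear ih h3 h4 h5 h6; omega
      dsimp only
      by_cases hv : s[m]'hmn = t
      · rw [if_pos (by simpa using hv)]
        simp only [if_true]
        have c4 : ∀ i (hi : i < s.length), left + (right - left) / 2 - 1 < (i : Int) → t ≤ s[i]'hi := by
          intro i hi hgt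
          have hmi : m ≤ i := by omega
          calc t = s[m]'hmn := hv.symm
            _ ≤ s[i]'hi := sorted_mono s hs hmn hi hmi
        have c5 : (left + (right - left) / 2 : Int) = -1 → ∀ i (hi : i < s.length), s[i]'hi = t → left ≤ (i : Int) ∧ (i : Int) ≤ left + (right - left) / 2 - 1 := by
          intro hc; exfalso; omega
        have c6 : (left + (right - left) / 2 : Int) ≠ -1 → ∃ (i : Nat) (hi : i < s.length), (left + (right - left) / 2 : Int) = (i : Int) ∧ s[i]'hi = t ∧ left ≤ (i : Int) ∧ (i : Int) ≤ left + (right - left) / 2 - 1 + 1 := by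
          intro _
          exact ⟨m, hmn, by omega, hv, by omega, by omega⟩
        exact ih left (left + (right - left) / 2 - 1) (left + (right - left) / 2)
          c1L h0 (by omega) (by omega) h3 c4 c5 c6
      · by_cases hv2 : t < s[m]'hmn
        · rw [if_neg (by simpa using hv), if_pos (by simpa using hv2)]
          have hnar : ∀ i (hi : i < s.length), s[i]'hi = t → i < m := by
            intro i hi hit
            by_contra hc
            have := sorted_mono s hs hmn hi (by omega)
            rw [hit] at this; omega
          have c4 : ∀ i (hi : i < s.length), left + (right - left) / 2 - 1 < (i : Int) → t ≤ s[i]'hi := by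
            intro i hi hgt
            have hmi : m ≤ i := by omega
            exact le_of_lt (lt_of_lt_of_le hv2 (sorted_mono s hs hmn hi hmi))
          have c5 : result = -1 → ∀ i (hi : i < s.length), s[i]'hi = t → left ≤ (i : Int) ∧ (i : Int) ≤ left + (right - left) / 2 - 1 := by
            intro hres i hi hit
            obtain ⟨ha, hb⟩ := h5 hres i hi hit
            have := hnar i hi hit
            exact ⟨ha, by omega⟩
          have c6 : result ≠ -1 → ∃ (i : Nat) (hi : i < s.length), result = (i : Int) ∧ s[i]'hi = t ∧ left ≤ (i : Int) ∧ (i : Int) ≤ left + (right - left) / 2 - 1 + 1 := by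
            intro hres
            obtain ⟨i, hi, hr, hit, hli, hir⟩ := h6 hres
            have := hnar i hi hit
            exact ⟨i, hi, hr, hit, hli, by omega⟩
          exact ih left (left + (right - left) / 2 - 1) result
            c1L h0 (by omega) (by omega) h3 c4 c5 c6
        · have hv3 : s[m]'hmn < t := by omega
          rw [if_neg (by simpa using hv), if_neg (by simpa using hv2)]
          have hnar : ∀ i (hi : i < s.length), s[i]'hi = t → m < i := by
            intro i hi hit
            by_contra hc
            have := sorted_mono s hs hi hmn (by omega)
            rw [hit] at this; omega
          have c3 : ∀ i (hi : i < s.length), (i : Int) < left + (right - left) / 2 + 1 → s[i]'hi < t := by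
            intro i hi hlt
            have him : i ≤ m := by omega
            exact lt_of_le_of_lt (sorted_mono s hs hi hmn him) hv3
          have c5 : result = -1 → ∀ i (hi : i < s.length), s[i]'hi = t → left + (right - left) / 2 + 1 ≤ (i : Int) ∧ (i : Int) ≤ right := by
            intro hres i hi hit
            obtain ⟨ha, hb⟩ := h5 hres i hi hit
            have := hnar i hi hit
            exact ⟨by omega, hb⟩
          have c6 : result ≠ -1 → ∃ (i : Nat) (hi : i < s.length), result = (i : Int) ∧ s[i]'hi = t ∧ left + (right - left) / 2 + 1 ≤ (i : Int) ∧ (i : Int) ≤ right + 1 := by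
            intro hres
            obtain ⟨i, hi, hr, hit, hli, hir⟩ := h6 hres
            have := hnar i hi hit
            exact ⟨i, hi, hr, hit, by omega, hir⟩
          exact ih (left + (right - left) / 2 + 1) right result
            c1R (by omega) h1 (by omega) c3 h4 c5 c6
    · rw [bsLoop, if_neg hlr]
      exact finish_first s t hs left right result (by omega) h0 h1 h3 h4 h5 h6

lemma loop_last (s : List Int) (t : Int)
    (hs : s.Pairwise (fun a b => a ≤ b)) :
    ∀ (fuel : Nat) (left right result : Int),
      (right + 1 - left).toNat ≤ fuel →
      0 ≤ left → right ≤ (s.length : Int) - 1 → left ≤ right + 1 →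
      (∀ i (hi : i < s.length), (i : Int) < left → s[i]'hi ≤ t) →
      (∀ i (hi : i < s.length), right < (i : Int) → t < s[i]'hi) →
      (result = -1 → ∀ i (hi : i < s.length), s[i]'hi = t → left ≤ (i : Int) ∧ (i : Int) ≤ right) →
      (result ≠ -1 → ∃ (i : Nat) (hi : i < s.length), result = (i : Int) ∧ s[i]'hi = t ∧ left - 1 ≤ (i : Int) ∧ (i : Int) ≤ right) →
      bsLoop s t false fuel left right result
        = (if s.count t = 0 then -1 else (s.countP (fun x => decide (x ≤ t)) : Int) - 1) := by
  intro fuel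
  induction fuel with
  | zero =>
    intro left right result hfuel h0 h1 h2 h3 h4 h5 h6
    exact finish_last s t hs left right result (by omega) h0 h1 h3 h4 h5 h6
  | succ f ih =>
    intro left right result hfuel h0 h1 h2 h3 h4 h5 h6
    by_cases hlr : left ≤ right
    · rw [bsLoop, if_pos hlr]
      have hfd : PySem.Int.floordiv (right - left) 2 = (right - left) / 2 :=
        PySem.Int.floordiv_eq_ediv_of_pos (by norm_num)
      have hd0 : 0 ≤ (right - left) / 2 := Int.ediv_nonneg (by omega) (by norm_num)
      have hd1 : (right - left) / 2 ≤ right - left := Int.ediv_le_self _ (by omega)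
      have hg0 : 0 ≤ left + (right - left) / 2 := by omega
      have hg1 : left + (right - left) / 2 < (s.length : Int) := by omega
      rw [hfd, PySem.List.pyGet?_eq_some_getElem s hg0 hg1]
      have hm : ((left + (right - left) / 2).toNat : Int) = left + (right - left) / 2 :=
        Int.toNat_of_nonneg hg0
      set m : Nat := (left + (right - left) / 2).toNat with hmdef
      have hmn : m < s.length := by omega
      have c1L : (left + (right - left) / 2 - 1 + 1 - left).toNat ≤ f := by
        clear ih h3 h4 h5 h6; omega
      have c1R : (right + 1 - (left + (right - left) / 2 + 1)).toNat ≤ f := by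
        clear ih h3 h4 h5 h6; omega
      dsimp only
      by_cases hv : s[m]'hmn = t
      · rw [if_pos (by simpa using hv)]
        simp only [Bool.false_eq_true, if_false]
        have c3 : ∀ i (hi : i < s.length), (i : Int) < left + (right - left) / 2 + 1 → s[i]'hi ≤ t := by
          intro i hi hlt
          have him : i ≤ m := by omega
          calc s[i]'hi ≤ s[m]'hmn := sorted_mono s hs hi hmn him
            _ = t := hv
        have c5 : (left + (right - left) / 2 : Int) = -1 → ∀ i (hi : i < s.length), s[i]'hi = t → left + (right - left) / 2 + 1 ≤ (i : Int) ∧ (i : Int) ≤ right := by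
          intro hc; exfalso; omega
        have c6 : (left + (right - left) / 2 : Int) ≠ -1 → ∃ (i : Nat) (hi : i < s.length), (left + (right - left) / 2 : Int) = (i : Int) ∧ s[i]'hi = t ∧ left + (right - left) / 2 + 1 - 1 ≤ (i : Int) ∧ (i : Int) ≤ right := by
          intro _
          exact ⟨m, hmn, by omega, hv, by omega, by omega⟩
        exact ih (left + (right - left) / 2 + 1) right (left + (right - left) / 2)
          c1R (by omega) h1 (by omega) c3 h4 c5 c6
      · by_cases hv2 : t < s[m]'hmn
        · rw [if_neg (by simpa using hv), if_pos (by simpa using hv2)]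
          have hnar : ∀ i (hi : i < s.length), s[i]'hi = t → i < m := by
            intro i hi hit
            by_contra hc
            have := sorted_mono s hs hmn hi (by omega)
            rw [hit] at this; omega
          have c4 : ∀ i (hi : i < s.length), left + (right - left) / 2 - 1 < (i : Int) → t < s[i]'hi := by
            intro i hi hgt
            have hmi : m ≤ i := by omega
            exact lt_of_lt_of_le hv2 (sorted_mono s hs hmn hi hmi)
          have c5 : result = -1 → ∀ i (hi : i < s.length), s[i]'hi = t → left ≤ (i : Int) ∧ (i : Int) ≤ left + (right - left) / 2 - 1 := by
            intro hres i hi hit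
            obtain ⟨ha, hb⟩ := h5 hres i hi hit
            have := hnar i hi hit
            exact ⟨ha, by omega⟩
          have c6 : result ≠ -1 → ∃ (i : Nat) (hi : i < s.length), result = (i : Int) ∧ s[i]'hi = t ∧ left - 1 ≤ (i : Int) ∧ (i : Int) ≤ left + (right - left) / 2 - 1 := by
            intro hres
            obtain ⟨i, hi, hr, hit, hli, hir⟩ := h6 hres
            have := hnar i hi hit
            exact ⟨i, hi, hr, hit, hli, by omega⟩
          exact ih left (left + (right - left) / 2 - 1) result
            c1L h0 (by omega) (by omega) h3 c4 c5 c6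
        · have hv3 : s[m]'hmn < t := by omega
          rw [if_neg (by simpa using hv), if_neg (by simpa using hv2)]
          have hnar : ∀ i (hi : i < s.length), s[i]'hi = t → m < i := by
            intro i hi hit
            by_contra hc
            have := sorted_mono s hs hi hmn (by omega)
            rw [hit] at this; omega
          have c3 : ∀ i (hi : i < s.length), (i : Int) < left + (right - left) / 2 + 1 → s[i]'hi ≤ t := by
            intro i hi hlt
            have him : i ≤ m := by omega
            exact le_of_lt (lt_of_le_of_lt (sorted_mono s hs hi hmn him) hv3)
          have c5 : result = -1 → ∀ i (hi : i < s.length), s[i]'hi = t → left + (right - left) / 2 + 1 ≤ (i : Int) ∧ (i : Int) ≤ right := by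
            intro hres i hi hit
            obtain ⟨ha, hb⟩ := h5 hres i hi hit
            have := hnar i hi hit
            exact ⟨by omega, hb⟩
          have c6 : result ≠ -1 → ∃ (i : Nat) (hi : i < s.length), result = (i : Int) ∧ s[i]'hi = t ∧ left + (right - left) / 2 + 1 - 1 ≤ (i : Int) ∧ (i : Int) ≤ right := by
            intro hres
            obtain ⟨i, hi, hr, hit, hli, hir⟩ := h6 hres
            have := hnar i hi hit
            exact ⟨i, hi, hr, hit, by omega, hir⟩
          exact ih (left + (right - left) / 2 + 1) right result
            c1R (by omega) h1 (by omega) c3 h4 c5 c6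
    · rw [bsLoop, if_neg hlr]
      exact finish_last s t hs left right result (by omega) h0 h1 h3 h4 h5 h6

-- ===== VERDICT (by name: the statement is the Claim_ definition above) =====
theorem entry_start_spec : Claim_equal_entry_start := by
  intro nums t isf _
  unfold Spec_entry_start entry_start entry_start_alt
  set s := PySem.List.sorted nums (fun x => x) false with hsdef
  have hperm : s.Perm nums := PySem.List.sorted_perm nums (fun x => x) false
  have hs : s.Pairwise (fun a b => a ≤ b) := by
    simpa using PySem.List.sorted_pairwise nums (fun x => x)
  have hcount : s.count t = nums.count t := hperm.count_eq t
  have hcp : ∀ p : Int → Bool, s.countP p = nums.countP p := fun p => hperm.countP_eq p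
  rw [altFold]
  simp only [zero_add]
  have hmain : bsLoop s t isf (s.length + 1) 0 ((s.length : Int) - 1) (-1)
      = (if s.count t = 0 then -1
         else if isf then (s.countP (fun x => decide (x < t)) : Int)
         else (s.countP (fun x => decide (x ≤ t)) : Int) - 1) := by
    cases isf with
    | true =>
      rw [loop_first s t hs (s.length + 1) 0 ((s.length : Int) - 1) (-1)
        (by omega) (le_refl _) (le_refl _) (by omega)
        (by intro i hi h; omega)
        (by intro i hi h; exfalso; omega)
        (by intro _ i hi _; omega)
        (by intro h; exact absurd rfl h)]
      simp
    | false =>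
      rw [loop_last s t hs (s.length + 1) 0 ((s.length : Int) - 1) (-1)
        (by omega) (le_refl _) (le_refl _) (by omega)
        (by intro i hi h; omega)
        (by intro i hi h; exfalso; omega)
        (by intro _ i hi _; omega)
        (by intro h; exact absurd rfl h)]
      simp
  rw [hmain, hcount, hcp, hcp]
  have hsplit := cnt_split t nums
  by_cases hz : nums.count t = 0
  · simp [hz]
  · simp only [hz, if_neg hz]
    have : (nums.count t : Int) ≠ 0 := by exact_mod_cast hz
    rw [if_neg this]
    cases isf <;> simp <;> push_cast [hsplit] <;> ring
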